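-- pv_equiv track=rewrite | github.com/waqasanwaar/MV-XNet | metrics_methodof_disk_mm.py | getIdealPointGroup
-- ===== SOURCE A (Python) =====
-- def getIdealPointGroup(points):
--   pointGroups = []
--   index = 0
--   subgroup = [points[0]]
--
--
--   for i in range(len(points) - 1):
--     prevPoint = points[i]
--     currentPoint = points[i+1]
--
--     if (abs(int(prevPoint[0])-int(currentPoint[0])) <= 1) and (abs(int(prevPoint[1])-int(currentPoint[1])) <= 1):
--       subgroup.append(currentPoint)
--     else:
--       pointGroups.append(subgroup[:])
--       subgroup = [currentPoint]
--
--   pointGroups.append(subgroup)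
--
--   mainPointGroup = []
--   maxPointGroupSize = 0
--
--   for group in pointGroups:
--     if len(group) > maxPointGroupSize:
--       maxPointGroup = group
--       maxPointGroupSize = len(group)
--
--   return maxPointGroup
-- ===== SOURCE B (Python) =====
-- def getIdealPointGroup(points):
--   # Dynamic programming on run lengths: run[i] = length of the adjacency run ending at i.
--   # The answer is the slice of points ending at the first position achieving max(run).
--   run = [1] * len(points)
--   for i in range(1, len(points)):
--     p, q = points[i - 1], points[i]
--     if abs(int(p[0]) - int(q[0])) <= 1 and abs(int(p[1]) - int(q[1])) <= 1:
--       run[i] = run[i - 1] + 1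
--   m = max(run)
--   e = run.index(m)
--   return points[e + 1 - m : e + 1]
-- ===== Notes on version B (the rewrite author's own statement) =====
-- stated objective: simpler
-- what changed: Replaces A's explicit list-of-runs construction and second scan with a run-length DP array: run[i] = length of the adjacency run ending at i, then one max/index and a single slice of the input; no group lists are ever built.
import Mathlib
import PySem

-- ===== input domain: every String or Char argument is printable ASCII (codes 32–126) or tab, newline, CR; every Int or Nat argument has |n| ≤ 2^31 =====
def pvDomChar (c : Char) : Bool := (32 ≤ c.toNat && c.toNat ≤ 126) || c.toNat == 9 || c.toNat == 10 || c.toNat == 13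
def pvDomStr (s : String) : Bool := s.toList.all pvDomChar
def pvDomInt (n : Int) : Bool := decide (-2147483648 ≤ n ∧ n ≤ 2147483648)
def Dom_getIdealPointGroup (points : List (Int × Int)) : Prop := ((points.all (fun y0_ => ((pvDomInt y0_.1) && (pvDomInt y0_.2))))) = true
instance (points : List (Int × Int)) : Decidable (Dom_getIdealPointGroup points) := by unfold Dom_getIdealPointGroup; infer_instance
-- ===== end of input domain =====

-- B replaces A's list-of-runs construction and second scan by a run-length DP array with one max/index and a single slice (objective: simpler).

-- the adjacency test shared verbatim by both Pythons: |Δx| ≤ 1 and |Δy| ≤ 1 (int() on an int is the identity)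
def pvClose (p q : Int × Int) : Bool := decide (|p.1 - q.1| ≤ 1) && decide (|p.2 - q.2| ≤ 1)

-- ===== PORT A =====
-- A's first loop body: state = (pointGroups, subgroup)
def aStep (st : List (List (Int × Int)) × List (Int × Int)) (pq : (Int × Int) × (Int × Int)) :
    List (List (Int × Int)) × List (Int × Int) :=
  if pvClose pq.1 pq.2 then (st.1, st.2 ++ [pq.2]) else (st.1 ++ [st.2], [pq.2])

-- A's second loop body: state = (maxPointGroup, maxPointGroupSize)
def scanStep (m : List (Int × Int) × Nat) (g : List (Int × Int)) : List (Int × Int) × Nat :=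
  if g.length > m.2 then (g, g.length) else m

-- A: build the list of all runs (pointGroups, subgroup), then pick the first longest run.
def getIdealPointGroup (points : List (Int × Int)) : List (Int × Int) :=
  match points with
  | [] => []  -- Python raises IndexError on points[0]; excluded by Pre_
  | p0 :: _ =>
    -- for i in range(len(points) - 1): prev = points[i], current = points[i+1]
    let st := (points.zip points.tail).foldl aStep ([], [p0])
    let pointGroups := st.1 ++ [st.2]
    -- for group in pointGroups: if len(group) > maxPointGroupSize: …
    ((pointGroups.foldl scanStep ([], 0)).1)

-- ===== PORT B =====
-- B's loop body: 'run[i] = run[i-1] + 1 if close else 1' — the array is built left to right,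
-- the state carries (the array so far, run[i-1]); a slot the Python leaves at its preset 1 is written as 1 here.
def rStep (st : List Int × Int) (pq : (Int × Int) × (Int × Int)) : List Int × Int :=
  if pvClose pq.1 pq.2 then (st.1 ++ [st.2 + 1], st.2 + 1) else (st.1 ++ [(1 : Int)], 1)

-- B: run-length DP array, then m = max(run), e = run.index(m), and the slice points[e+1-m : e+1].
def getIdealPointGroup_alt (points : List (Int × Int)) : List (Int × Int) :=
  match points with
  | [] => []  -- Python raises ValueError at max([]); excluded by Pre_
  | _ :: _ =>
    let run := ((points.zip points.tail).foldl rStep ([1], 1)).1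
    match PySem.List.max? run (fun x => x) with
    | none => []  -- unreachable: run is nonempty
    | some m =>
      match PySem.List.index? run m with
      | none => []  -- unreachable: m ∈ run
      | some e => PySem.List.slice points (some ((e : Int) + 1 - m)) (some ((e : Int) + 1))

-- ===== PRECONDITION & SPEC =====
-- Pre_ excludes only the empty list, on which Python A raises IndexError (and Python B raises ValueError).
def Pre_getIdealPointGroup (points : List (Int × Int)) : Prop := points ≠ []
instance (points : List (Int × Int)) : Decidable (Pre_getIdealPointGroup points) := by unfold Pre_getIdealPointGroup; infer_instance
def pvWitness_getIdealPointGroup : (List (Int × Int)) := [(0, 0), (5, 5)]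
def Spec_getIdealPointGroup (points : List (Int × Int)) (out : List (Int × Int)) : Prop := out = getIdealPointGroup_alt points
instance (points : List (Int × Int)) (out : List (Int × Int)) : Decidable (Spec_getIdealPointGroup points out) := by unfold Spec_getIdealPointGroup; infer_instance

-- ===== CLAIM (what is proved, stated in full; the proofs are below) =====
def Claim_equal_getIdealPointGroup : Prop := ∀ (points : List (Int × Int)), Dom_getIdealPointGroup points → Pre_getIdealPointGroup points → Spec_getIdealPointGroup points (getIdealPointGroup points)

-- ===== LEMMAS AND PROOFS =====

-- the maximal adjacency run starting at h, and the remainder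
def leadingRun : (Int × Int) → List (Int × Int) → List (Int × Int) × List (Int × Int)
  | h, [] => ([h], [])
  | h, q :: r => if pvClose h q then (h :: (leadingRun q r).1, (leadingRun q r).2) else ([h], q :: r)

theorem leadingRun_snd_length (h : Int × Int) (t : List (Int × Int)) :
    (leadingRun h t).2.length ≤ t.length := by
  fun_induction leadingRun h t with
  | case1 h => simp
  | case2 h q r hc ih => simpa using Nat.le_succ_of_le ih
  | case3 h q r hc => simp

-- the run decomposition of the whole list
def groupsOf : List (Int × Int) → List (List (Int × Int))
  | [] => []
  | p :: t => (leadingRun p t).1 :: groupsOf (leadingRun p t).2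
termination_by pts => pts.length
decreasing_by
  exact Nat.lt_succ_of_le (leadingRun_snd_length p t)

-- the first longest group (right-recursive form)
def fm : List (List (Int × Int)) → List (Int × Int)
  | [] => []
  | g :: gs => if (fm gs).length ≤ g.length then g else fm gs

def maxLen (gs : List (List (Int × Int))) : Nat := gs.foldr (fun g m => max g.length m) 0

-- [k, k+1, …, k+L-1]
def rampK (k : Int) (L : Nat) : List Int := (List.range L).map (fun j : Nat => k + (j : Int))

-- the run-length array, described group by group
def runsOf (gs : List (List (Int × Int))) : List Int := gs.flatMap (fun g => rampK 1 g.length)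

theorem leadingRun_fst_cons (h : Int × Int) (t : List (Int × Int)) :
    ∃ r, (leadingRun h t).1 = h :: r := by
  cases t with
  | nil => exact ⟨[], rfl⟩
  | cons q r =>
    by_cases hc : pvClose h q = true <;> simp [leadingRun, hc]

theorem leadingRun_append (h : Int × Int) (t : List (Int × Int)) :
    (leadingRun h t).1 ++ (leadingRun h t).2 = h :: t := by
  fun_induction leadingRun h t with
  | case1 h => simp
  | case2 h q r hc ih => simpa using ih
  | case3 h q r hc => simp

theorem flatten_groupsOf : ∀ pts : List (Int × Int), (groupsOf pts).flatten = pts := by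
  intro pts
  fun_induction groupsOf pts with
  | case1 => simp
  | case2 p t ih =>
    simp only [List.flatten_cons, ih]
    exact leadingRun_append p t

theorem groupsOf_ne_nil_mem : ∀ pts : List (Int × Int), ∀ g ∈ groupsOf pts, g ≠ [] := by
  intro pts
  fun_induction groupsOf pts with
  | case1 => simp
  | case2 p t ih =>
    intro g hg
    rcases List.mem_cons.mp hg with h | h
    · obtain ⟨r, hr⟩ := leadingRun_fst_cons p t
      simp [h, hr]
    · exact ih g h

-- A's first loop across one maximal run
theorem L1A (h : Int × Int) (t : List (Int × Int)) :
    ∀ (G : List (List (Int × Int))) (s : List (Int × Int)),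
    ((h :: t).zip t).foldl aStep (G, s ++ [h]) =
      (match (leadingRun h t).2 with
       | [] => (G, s ++ (leadingRun h t).1)
       | q :: r => ((q :: r).zip r).foldl aStep (G ++ [s ++ (leadingRun h t).1], [q])) := by
  fun_induction leadingRun h t with
  | case1 h => intro G s; simp
  | case2 h q r hc ih =>
    intro G s
    have step : aStep (G, s ++ [h]) (h, q) = (G, (s ++ [h]) ++ [q]) := by
      simp [aStep, hc]
    simpa [List.zip_cons_cons, step] using ih G (s ++ [h])
  | case3 h q r hc =>
    intro G s
    have step : aStep (G, s ++ [h]) (h, q) = (G ++ [s ++ [h]], [q]) := by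
      simp [aStep, hc]
    simp [List.zip_cons_cons, step]

-- A's first loop, characterised by the run decomposition
theorem L_A_groups : ∀ pts : List (Int × Int), pts ≠ [] →
    ∀ (G : List (List (Int × Int))),
    (let st := (pts.zip pts.tail).foldl aStep (G, [pts.headI]); st.1 ++ [st.2]) = G ++ groupsOf pts := by
  intro pts
  fun_induction groupsOf pts with
  | case1 => intro hpt; exact absurd rfl hpt
  | case2 p t ih =>
    intro _ G
    have h1 := L1A p t G []
    simp only [List.nil_append] at h1
    simp only [List.tail_cons, List.headI_cons]
    cases hrest : (leadingRun p t).2 with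
    | nil =>
      rw [h1, hrest]
      simp [groupsOf]
    | cons q r =>
      rw [h1, hrest]
      have := ih (by simp [hrest]) (G ++ [(leadingRun p t).1])
      rw [hrest] at this
      simp only [List.tail_cons, List.headI_cons] at this
      simp only [this]
      simp

theorem rampK_cons (k : Int) (L : Nat) : rampK k (L + 1) = k :: rampK (k + 1) L := by
  unfold rampK
  rw [List.range_succ_eq_map, List.map_cons, List.map_map]
  simp only [Nat.cast_zero, add_zero]
  congr 1
  refine List.map_congr_left fun j _ => ?_
  simp only [Function.comp_apply]
  push_cast
  ring

theorem rampK_snoc (k : Int) (L : Nat) : rampK k (L + 1) = rampK k L ++ [k + L] := by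
  simp [rampK, List.range_succ]

theorem mem_rampK {y k : Int} {L : Nat} : y ∈ rampK k L ↔ ∃ j : Nat, j < L ∧ y = k + j := by
  simp [rampK, eq_comm]

-- B's loop across one maximal run
theorem L1B (h : Int × Int) (t : List (Int × Int)) :
    ∀ (acc : List Int) (k : Int),
    ((h :: t).zip t).foldl rStep (acc ++ [k], k) =
      (match (leadingRun h t).2 with
       | [] => (acc ++ rampK k (leadingRun h t).1.length,
                k + (((leadingRun h t).1.length - 1 : Nat) : Int))
       | q :: r => ((q :: r).zip r).foldl rStep ((acc ++ rampK k (leadingRun h t).1.length) ++ [1], 1)) := by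
  fun_induction leadingRun h t with
  | case1 h => intro acc k; simp [rampK]
  | case2 h q r hc ih =>
    intro acc k
    have step : rStep (acc ++ [k], k) (h, q) = ((acc ++ [k]) ++ [k + 1], k + 1) := by
      simp [rStep, hc]
    obtain ⟨r', hr'⟩ := leadingRun_fst_cons q r
    have ih2 := ih (acc ++ [k]) (k + 1)
    simp only [List.zip_cons_cons, List.foldl_cons, step, ih2]
    cases hrest : (leadingRun q r).2 with
    | nil =>
      simp only [hr', Prod.mk.injEq, List.length_cons]
      constructor
      · simp [rampK_cons]
      · rw [Nat.add_sub_cancel, Nat.add_sub_cancel]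
        push_cast
        ring
    | cons q2 r2 =>
      simp only [hr', List.length_cons]
      simp [rampK_cons]
  | case3 h q r hc =>
    intro acc k
    have step : rStep (acc ++ [k], k) (h, q) = ((acc ++ [k]) ++ [1], 1) := by
      simp [rStep, hc]
    simp [List.zip_cons_cons, step, rampK]

-- B's loop, characterised by the run decomposition
theorem L_B_groups : ∀ pts : List (Int × Int), pts ≠ [] → ∀ (acc : List Int),
    ((pts.zip pts.tail).foldl rStep (acc ++ [1], 1)).1 = acc ++ runsOf (groupsOf pts) := by
  intro pts
  fun_induction groupsOf pts with
  | case1 => intro hpt; exact absurd rfl hpt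
  | case2 p t ih =>
    intro _ acc
    have h1 := L1B p t acc 1
    simp only [List.tail_cons]
    cases hrest : (leadingRun p t).2 with
    | nil =>
      rw [h1, hrest]
      simp [groupsOf, runsOf]
    | cons q r =>
      rw [h1, hrest]
      have := ih (by simp [hrest]) (acc ++ rampK 1 (leadingRun p t).1.length)
      rw [hrest] at this
      simp only [List.tail_cons] at this
      simp only [this]
      simp [runsOf, groupsOf]

theorem fm_len : ∀ gs, (fm gs).length = maxLen gs := by
  intro gs
  induction gs with
  | nil => simp [fm, maxLen]
  | cons g gs ih =>
    simp only [fm, maxLen, List.foldr_cons]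
    split_ifs with hle <;> simp only [ih] at * <;> simp [maxLen] at * <;> omega

theorem scan_eq_fm : ∀ gs (b : List (Int × Int)),
    (gs.foldl scanStep (b, b.length)).1 = if b.length < (fm gs).length then fm gs else b := by
  intro gs
  induction gs with
  | nil => intro b; simp [fm]
  | cons g gs ih =>
    intro b
    simp only [List.foldl_cons, scanStep]
    by_cases hgb : g.length > b.length
    · rw [if_pos hgb, ih g]
      simp only [fm]
      split_ifs <;> first | rfl | omega
    · rw [if_neg hgb, ih b]
      simp only [fm]
      split_ifs <;> first | rfl | omega

theorem maxLen_cons (g : List (Int × Int)) (gs : List (List (Int × Int))) :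
    maxLen (g :: gs) = max g.length (maxLen gs) := rfl

theorem runsOf_le : ∀ gs, ∀ y ∈ runsOf gs, y ≤ (maxLen gs : Int) := by
  intro gs
  induction gs with
  | nil => simp [runsOf]
  | cons g gs ih =>
    intro y hy
    rw [maxLen_cons]
    simp only [runsOf, List.flatMap_cons] at hy
    rcases List.mem_append.mp hy with h | h
    · obtain ⟨j, hj, rfl⟩ := mem_rampK.mp h
      push_cast
      omega
    · have := ih y (by simpa [runsOf] using h)
      push_cast
      omega

theorem maxLen_mem : ∀ gs, (∀ g ∈ gs, g ≠ []) → gs ≠ [] → ((maxLen gs : Int)) ∈ runsOf gs := by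
  intro gs
  induction gs with
  | nil => intro _ h; exact absurd rfl h
  | cons g gs ih =>
    intro hnn _
    have hg1 : 1 ≤ g.length := List.length_pos_iff.mpr (hnn g (List.mem_cons_self))
    rw [maxLen_cons]
    simp only [runsOf, List.flatMap_cons]
    by_cases hle : maxLen gs ≤ g.length
    · rw [Nat.max_eq_left hle]
      exact List.mem_append.mpr (Or.inl (mem_rampK.mpr ⟨g.length - 1, by omega, by omega⟩))
    · rw [Nat.max_eq_right (Nat.le_of_not_le hle)]
      have hgs : gs ≠ [] := by
        intro h; subst h; simp [maxLen] at hle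
      exact List.mem_append.mpr (Or.inr (by
        simpa [runsOf] using ih (fun g hg => hnn g (List.mem_cons_of_mem _ hg)) hgs))

theorem length_rampK (k : Int) (L : Nat) : (rampK k L).length = L := by
  simp [rampK]

theorem index?_append_of_not_mem (v : Int) (l t : List Int) (h : v ∉ l) :
    PySem.List.index? (l ++ t) v = (PySem.List.index? t v).map (· + l.length) := by
  simp only [PySem.List.index?_eq_idxOf?, List.idxOf?, List.findIdx?_append]
  have hnone : List.findIdx? (fun a => a == v) l = none := by
    rw [List.findIdx?_eq_none_iff]
    intro x hx
    exact beq_eq_false_iff_ne.mpr (fun hxv => h (hxv ▸ hx))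
  simp [hnone]

theorem index?_rampK_last (L : Nat) (hL : 1 ≤ L) :
    PySem.List.index? (rampK 1 L) ((L : Nat) : Int) = some (L - 1) := by
  have hsnoc : rampK 1 L = rampK 1 (L - 1) ++ [(L : Int)] := by
    have h1 : L = (L - 1) + 1 := by omega
    rw [h1, rampK_snoc]
    have h2 : (1 : Int) + ((L - 1 : Nat) : Int) = ((L - 1) + 1 : Nat) := by push_cast; ring
    rw [h2, ← h1]
  rw [hsnoc, PySem.List.index?_append_singleton_self (l := rampK 1 (L - 1)) (c := (L : Int))
    (by
      intro hmem
      obtain ⟨j, hj, hLj⟩ := mem_rampK.mp hmem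
      omega), length_rampK]

theorem key : ∀ gs, (∀ g ∈ gs, g ≠ []) → gs ≠ [] →
    ∃ e : Nat, PySem.List.index? (runsOf gs) ((maxLen gs : Int)) = some e ∧
      maxLen gs ≤ e + 1 ∧
      ((gs.flatten).drop (e + 1 - maxLen gs)).take (maxLen gs) = fm gs := by
  intro gs
  induction gs with
  | nil => intro _ h; exact absurd rfl h
  | cons g gs ih =>
    intro hnn _
    have hg1 : 1 ≤ g.length := List.length_pos_iff.mpr (hnn g (List.mem_cons_self))
    have hr : runsOf (g :: gs) = rampK 1 g.length ++ runsOf gs := by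
      simp [runsOf]
    by_cases hle : maxLen gs ≤ g.length
    · -- the head group is a first longest group
      have hM : maxLen (g :: gs) = g.length := by rw [maxLen_cons]; omega
      refine ⟨g.length - 1, ?_, by omega, ?_⟩
      · rw [hr, hM, PySem.List.index?_append_of_mem _
          (mem_rampK.mpr ⟨g.length - 1, by omega, by omega⟩)]
        exact index?_rampK_last g.length hg1
      · rw [hM]
        have h0 : g.length - 1 + 1 - g.length = 0 := by omega
        rw [h0, List.flatten_cons, List.drop_zero, List.take_left]
        have hfm : (fm gs).length ≤ g.length := by rw [fm_len]; exact hle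
        simp [fm, hfm]
    · -- the first longest group lies in the tail
      have hgs : gs ≠ [] := by
        intro h; subst h; simp [maxLen] at hle
      have hM : maxLen (g :: gs) = maxLen gs := by rw [maxLen_cons]; omega
      obtain ⟨e', hidx, hbound, hslice⟩ := ih (fun g hg => hnn g (List.mem_cons_of_mem _ hg)) hgs
      refine ⟨e' + g.length, ?_, by omega, ?_⟩
      · rw [hr, hM, index?_append_of_not_mem _ _ _
          (by
            intro hmem
            obtain ⟨j, hj, hLj⟩ := mem_rampK.mp hmem
            omega), hidx]
        simp [length_rampK]
      · rw [hM, List.flatten_cons]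
        have harith : e' + g.length + 1 - maxLen gs = g.length + (e' + 1 - maxLen gs) := by omega
        rw [harith, List.drop_length_add_append, hslice]
        have hfm : ¬ (fm gs).length ≤ g.length := by rw [fm_len]; omega
        simp [fm, hfm]

-- ===== VERDICT (by name: the statement is the Claim_ definition above) =====
theorem maxLen_pos (pts : List (Int × Int)) (g0 : List (Int × Int)) (gs : List (List (Int × Int)))
    (h : groupsOf pts = g0 :: gs) : 1 ≤ maxLen (groupsOf pts) := by
  have hg0 : g0 ≠ [] := groupsOf_ne_nil_mem pts g0 (h ▸ List.mem_cons_self)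
  rw [h, maxLen_cons]
  have := List.length_pos_iff.mpr hg0
  omega

theorem getIdealPointGroup_spec : Claim_equal_getIdealPointGroup := by
  intro points _ hpre
  unfold Spec_getIdealPointGroup
  obtain ⟨p, t, rfl⟩ : ∃ p t, points = p :: t := by
    cases points with
    | nil => exact absurd rfl hpre
    | cons p t => exact ⟨p, t, rfl⟩
  have hnn := groupsOf_ne_nil_mem (p :: t)
  obtain ⟨g0, gs0, hg0⟩ : ∃ g0 gs0, groupsOf (p :: t) = g0 :: gs0 := by
    rw [groupsOf]; exact ⟨_, _, rfl⟩
  have hgsne : groupsOf (p :: t) ≠ [] := by rw [hg0]; simp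
  have hmax1 : 1 ≤ maxLen (groupsOf (p :: t)) := maxLen_pos _ _ _ hg0
  -- A's side: the first longest group of the run decomposition
  have hA : getIdealPointGroup (p :: t) = fm (groupsOf (p :: t)) := by
    unfold getIdealPointGroup
    have hAg := L_A_groups (p :: t) (by simp) []
    simp only [List.headI_cons, List.nil_append] at hAg
    simp only [List.tail_cons] at hAg ⊢
    rw [hAg]
    have hscan := scan_eq_fm (groupsOf (p :: t)) []
    simp only [List.length_nil] at hscan
    rw [hscan, if_pos (by rw [fm_len]; omega)]
  -- B's side: the DP array is runsOf, its max is maxLen, and the slice is the same group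
  have hrun := L_B_groups (p :: t) (by simp) []
  simp only [List.tail_cons, List.nil_append] at hrun
  have hM : PySem.List.max? (runsOf (groupsOf (p :: t))) (fun x => x) =
      some ((maxLen (groupsOf (p :: t)) : Int)) := by
    cases hmx : PySem.List.max? (runsOf (groupsOf (p :: t))) (fun x => x) with
    | none =>
      have := (PySem.List.max?_eq_none_iff _ _).mp hmx
      exact absurd (this ▸ maxLen_mem _ hnn hgsne) (List.not_mem_nil)
    | some m0 =>
      have h1 : m0 ≤ (maxLen (groupsOf (p :: t)) : Int) :=
        runsOf_le _ m0 (PySem.List.max?_mem hmx)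
      have h2 : (maxLen (groupsOf (p :: t)) : Int) ≤ m0 :=
        PySem.List.max?_isMax hmx _ (maxLen_mem _ hnn hgsne)
      rw [le_antisymm h1 h2]
  obtain ⟨e, hidx, hbound, hslice⟩ := key (groupsOf (p :: t)) hnn hgsne
  unfold getIdealPointGroup_alt
  simp only [List.tail_cons, hrun, hM, hidx]
  rw [PySem.List.slice_toNat _ (by omega) (by omega)]
  have h1 : ((e : Int) + 1 - (maxLen (groupsOf (p :: t)) : Int)).toNat =
      e + 1 - maxLen (groupsOf (p :: t)) := by omega
  have h2 : ((e : Int) + 1).toNat = e + 1 := by omega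
  rw [h1, h2]
  have h3 : e + 1 - (e + 1 - maxLen (groupsOf (p :: t))) = maxLen (groupsOf (p :: t)) := by omega
  rw [h3, hA, ← hslice, flatten_groupsOf]
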